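-- pv_equiv track=rewrite | github.com/jojo11h/training_project | function/main.py | update_product_csv
-- ===== SOURCE A (Python) =====
-- def update_product_csv(file):
--     product_totals = {}
--
--     for item in file:
--         product_id, product_name, price, quantity = item
--     # Vérifier si le nom du produit est déjà présent dans le dictionnaire
--         if product_name in product_totals:
--             # ajouter la quantité actuelle à la quantité existante
--             product_totals[product_name][3] = str(
--                 int(product_totals[product_name][3]) + int(quantity))
--         else:
--             # Sinon, ajouter une nouvelle entrée dans le dictionnaire
--             product_totals[product_name] = item
--     # Convertir le dictionnaire en une liste de listes
--     result = list(product_totals.values())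
--     return result
-- ===== SOURCE B (Python) =====
-- def update_product_csv(file):
--     # Two-pass decomposition: group rows by product name first, then
--     # aggregate each group.  Mutates the first row of each multi-row group
--     # in place (index 3), exactly like the original.
--     groups = {}
--     for item in file:
--         _, product_name, _, _ = item
--         groups.setdefault(product_name, []).append(item)
--     result = []
--     for items in groups.values():
--         first = items[0]
--         for other in items[1:]:
--             first[3] = str(int(first[3]) + int(other[3]))
--         result.append(first)
--     return result
-- ===== Notes on version B (the rewrite author's own statement) =====
-- stated objective: alternative
-- what changed: Replaces A's single-pass dict of incrementally-updated rows with a two-pass decomposition: first group the rows by product name (setdefault/append), then aggregate each group's quantities into its first row; same in-place mutation of the first row of each duplicated group.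
import Mathlib
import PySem

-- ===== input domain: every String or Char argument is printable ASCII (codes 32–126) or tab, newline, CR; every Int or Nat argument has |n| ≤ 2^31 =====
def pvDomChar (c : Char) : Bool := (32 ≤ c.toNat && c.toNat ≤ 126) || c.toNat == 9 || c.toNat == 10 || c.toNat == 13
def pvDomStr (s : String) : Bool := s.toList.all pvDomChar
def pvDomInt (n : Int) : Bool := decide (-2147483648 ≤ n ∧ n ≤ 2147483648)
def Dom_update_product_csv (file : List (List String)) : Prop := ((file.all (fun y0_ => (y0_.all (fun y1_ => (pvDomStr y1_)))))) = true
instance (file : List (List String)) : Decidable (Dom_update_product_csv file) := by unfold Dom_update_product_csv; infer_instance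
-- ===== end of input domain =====

-- B is a two-pass group-then-aggregate decomposition of A (A: one pass updating stored rows).
-- Both Pythons mutate the first row of each duplicated group in place identically; the theorems
-- are about the returned value.

-- ===== PORT A =====
-- literal port of A: one fold over the rows keeping dict name -> stored row.
-- 'int(s)' is PySem.Int.ofStr?; '.getD 0' only fires where Python raises ValueError (excluded by Pre_);
-- rows that are not 4-tuples make Python's unpacking raise (excluded by Pre_), the port skips them;
-- 'v.getD 3 ""' is v[3] on the stored row, always of length 4 here.
def update_product_csv (file : List (List String)) : List (List String) :=
  (file.foldl (fun product_totals item =>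
    match item with
    | [_, product_name, _, quantity] =>
      if product_totals.contains product_name then
        product_totals.modify product_name [] (fun v =>
          v.set 3 (PySem.Int.toStr ((PySem.Int.ofStr? (v.getD 3 "")).getD 0
                                     + (PySem.Int.ofStr? quantity).getD 0)))
      else
        product_totals.insert product_name item
    | _ => product_totals) PySem.Dict.empty).values

-- ===== PORT B =====
-- literal port of Source B: pass 1 groups rows by name (setdefault/append = modify with default []);
-- pass 2 folds each group's tail into its first row ('items[0]' is headD, never empty inside Pre_);
-- the '_, product_name, _, _ = item' unpacking is ported as the arity check 'item.length = 4'
-- plus 'item.getD 1 ""' (= item[1] on a 4-field row); rows that are not 4-tuples make Python's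
-- unpacking raise (excluded by Pre_), the port skips them.
def update_product_csv_alt (file : List (List String)) : List (List String) :=
  let groups := file.foldl (fun g item =>
    if item.length = 4 then g.modify (item.getD 1 "") [] (fun l => l ++ [item])
    else g) PySem.Dict.empty
  groups.values.map (fun items =>
    (items.drop 1).foldl (fun first other =>
      first.set 3 (PySem.Int.toStr ((PySem.Int.ofStr? (first.getD 3 "")).getD 0
                                     + (PySem.Int.ofStr? (other.getD 3 "")).getD 0)))
      (items.headD []))

-- ===== PRECONDITION & SPEC =====
-- Pre_ = exactly the inputs where Python A returns normally: every row unpacks into 4 fields, and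
-- whenever a product name occurs more than once every quantity of that name parses as int
-- (otherwise Python A raises ValueError).
def Pre_update_product_csv (file : List (List String)) : Prop :=
  (∀ item ∈ file, item.length = 4) ∧
  (∀ item ∈ file,
    1 < (file.filter (fun j => j.getD 1 "" == item.getD 1 "")).length →
    (PySem.Int.ofStr? (item.getD 3 "")).isSome = true)
instance (file : List (List String)) : Decidable (Pre_update_product_csv file) := by
  unfold Pre_update_product_csv; infer_instance

def pvWitness_update_product_csv : List (List String) :=
  [["1", "apple", "2", "3"], ["2", "apple", "2", "4"], ["3", "pear", "1", "x"]]

def Spec_update_product_csv (file : List (List String)) (out : List (List String)) : Prop := out = update_product_csv_alt file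
instance (file : List (List String)) (out : List (List String)) : Decidable (Spec_update_product_csv file out) := by unfold Spec_update_product_csv; infer_instance

-- ===== CLAIM (what is proved, stated in full; the proofs are below) =====
def Claim_equal_update_product_csv : Prop := ∀ (file : List (List String)), Dom_update_product_csv file → Pre_update_product_csv file → Spec_update_product_csv file (update_product_csv file)

-- ===== LEMMAS AND PROOFS =====

-- the shared row-combining step (B's inner loop body; also what A applies per duplicate)
def pvStep (first other : List String) : List String :=
  first.set 3 (PySem.Int.toStr ((PySem.Int.ofStr? (first.getD 3 "")).getD 0
                                 + (PySem.Int.ofStr? (other.getD 3 "")).getD 0))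

-- B's aggregation of one group
def pvRed (items : List (List String)) : List String :=
  (items.drop 1).foldl pvStep (items.headD [])

-- the two fold steps
def pvStepA (d : PySem.Dict String (List String)) (item : List String) :
    PySem.Dict String (List String) :=
  match item with
  | [_, product_name, _, quantity] =>
    if d.contains product_name then
      d.modify product_name [] (fun v =>
        v.set 3 (PySem.Int.toStr ((PySem.Int.ofStr? (v.getD 3 "")).getD 0
                                   + (PySem.Int.ofStr? quantity).getD 0)))
    else
      d.insert product_name item
  | _ => d

def pvStepB (g : PySem.Dict String (List (List String))) (item : List String) :
    PySem.Dict String (List (List String)) :=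
  if item.length = 4 then g.modify (item.getD 1 "") [] (fun l => l ++ [item])
  else g

theorem pvPortA_eq (file : List (List String)) :
    update_product_csv file = (file.foldl pvStepA PySem.Dict.empty).values := rfl

theorem pvPortB_eq (file : List (List String)) :
    update_product_csv_alt file = (file.foldl pvStepB PySem.Dict.empty).values.map pvRed := rfl

theorem pvRed_singleton (x : List String) : pvRed [x] = x := rfl

theorem pvRed_append (items : List (List String)) (x : List String) (h : items ≠ []) :
    pvRed (items ++ [x]) = pvStep (pvRed items) x := by
  cases items with
  | nil => exact absurd rfl h
  | cons a t => simp [pvRed, List.foldl_append]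

theorem pvEq_of_nodup_keys {p q : String × List (List String)}
    {l : List (String × List (List String))}
    (h : (l.map Prod.fst).Nodup) (hp : p ∈ l) (hq : q ∈ l) (hk : p.1 = q.1) : p = q := by
  induction l with
  | nil => cases hp
  | cons a t ih =>
    rw [List.map_cons, List.nodup_cons] at h
    rcases List.mem_cons.mp hp with rfl | hp1
    · rcases List.mem_cons.mp hq with rfl | hq1
      · rfl
      · have hmem : q.1 ∈ t.map Prod.fst := List.mem_map.mpr ⟨q, hq1, rfl⟩
        rw [← hk] at hmem
        exact absurd hmem h.1
    · rcases List.mem_cons.mp hq with rfl | hq1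
      · have hmem : p.1 ∈ t.map Prod.fst := List.mem_map.mpr ⟨p, hp1, rfl⟩
        rw [hk] at hmem
        exact absurd hmem h.1
      · exact ih h.2 hp1 hq1

-- main invariant: A's dict is B's group dict with every group aggregated by pvRed
theorem pvMain (file : List (List String)) (h4 : ∀ item ∈ file, item.length = 4) :
    (file.foldl pvStepA PySem.Dict.empty).items
      = (file.foldl pvStepB PySem.Dict.empty).items.map (fun p => (p.1, pvRed p.2))
    ∧ (file.foldl pvStepB PySem.Dict.empty).keys.Nodup
    ∧ ∀ p ∈ (file.foldl pvStepB PySem.Dict.empty).items, p.2 ≠ [] := by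
  induction file using List.reverseRecOn with
  | nil =>
    refine ⟨rfl, by simp [PySem.Dict.keys_empty], ?_⟩
    intro p hp
    simp only [List.foldl_nil] at hp
    rw [show (PySem.Dict.empty : PySem.Dict String (List (List String))).items = [] from rfl] at hp
    cases hp
  | append_singleton l x ih =>
    obtain ⟨hitems, hnodup, hne⟩ := ih (fun i hi => h4 i (by simp [hi]))
    have hx4 : x.length = 4 := h4 x (by simp)
    obtain ⟨a, b, c, d, rfl⟩ : ∃ a b c d, x = [a, b, c, d] := by
      match x, hx4 with
      | [a, b, c, d], _ => exact ⟨a, b, c, d, rfl⟩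
    set A := l.foldl pvStepA PySem.Dict.empty with hA
    set B := l.foldl pvStepB PySem.Dict.empty with hB
    have hfoldA : (l ++ [[a,b,c,d]]).foldl pvStepA PySem.Dict.empty = pvStepA A [a,b,c,d] := by
      rw [List.foldl_append]; rfl
    have hfoldB : (l ++ [[a,b,c,d]]).foldl pvStepB PySem.Dict.empty = pvStepB B [a,b,c,d] := by
      rw [List.foldl_append]; rfl
    have hkeys : A.keys = B.keys := by
      simp only [PySem.Dict.keys, hitems, List.map_map]
      rfl
    have hcont : A.contains b = B.contains b := by
      simp [PySem.Dict.contains_eq_decide_mem_keys, hkeys]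
    have hAnodup : A.keys.Nodup := by rw [hkeys]; exact hnodup
    rw [hfoldA, hfoldB]
    by_cases hc : B.contains b = true
    · -- existing key
      have hbmem : b ∈ B.keys := (PySem.Dict.contains_iff_mem_keys B b).mp hc
      rw [PySem.Dict.keys] at hbmem
      obtain ⟨⟨pk, pv⟩, hpmem, hp1⟩ := List.mem_map.mp hbmem
      have hb : pk = b := hp1
      subst hb
      have hAc : A.contains pk = true := hcont.trans hc
      have hgetB : B.getD pk [] = pv := PySem.Dict.getD_of_mem_items B hpmem hnodup []
      have hAim : (pk, pvRed pv) ∈ A.items := by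
        rw [hitems]; exact List.mem_map.mpr ⟨(pk, pv), hpmem, rfl⟩
      have hgetA : A.getD pk [] = pvRed pv :=
        PySem.Dict.getD_of_mem_items A hAim hAnodup []
      have hpvne : pv ≠ [] := hne (pk, pv) hpmem
      have hstepA : pvStepA A [a, pk, c, d]
          = A.insert pk (pvStep (pvRed pv) [a, pk, c, d]) := by
        simp only [pvStepA, hAc, if_true, PySem.Dict.modify, hgetA]
        rfl
      have hstepB : pvStepB B [a, pk, c, d]
          = B.insert pk (pv ++ [[a, pk, c, d]]) := by
        show B.insert pk (B.getD pk [] ++ [[a, pk, c, d]]) = _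
        rw [hgetB]
      refine ⟨?_, ?_, ?_⟩
      · rw [hstepA, hstepB, PySem.Dict.items_insert_of_contains A _ hAc,
            PySem.Dict.items_insert_of_contains B _ hc, hitems, List.map_map, List.map_map]
        apply List.map_congr_left
        intro q hq
        by_cases hqb : q.1 = pk
        · have hqp : q = (pk, pv) :=
            pvEq_of_nodup_keys (by simpa [PySem.Dict.keys] using hnodup) hq hpmem (by simpa using hqb)
          subst hqp
          simp [Function.comp, pvRed_append pv _ hpvne]
        · simp [Function.comp, hqb]
      · rw [hstepB, PySem.Dict.keys_insert_of_contains B _ hc]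
        exact hnodup
      · intro q hq
        rw [hstepB] at hq
        rcases (PySem.Dict.mem_items_insert _ _ _ _).mp hq with rfl | h1
        · simp
        · exact hne q h1.1
    · -- new key
      have hcf : B.contains b = false := by simpa using hc
      have hAcf : A.contains b = false := by rw [hcont, hcf]
      have hstepA : pvStepA A [a, b, c, d] = A.insert b [a, b, c, d] := by
        simp [pvStepA, hAcf]
      have hstepB : pvStepB B [a, b, c, d] = B.insert b [[a, b, c, d]] := by
        show B.insert b (B.getD b [] ++ [[a, b, c, d]]) = _
        rw [PySem.Dict.getD_of_not_contains B [] hcf, List.nil_append]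
      refine ⟨?_, ?_, ?_⟩
      · rw [hstepA, hstepB, PySem.Dict.items_insert_of_not_contains A _ hAcf,
            PySem.Dict.items_insert_of_not_contains B _ hcf, hitems]
        simp [pvRed_singleton]
      · rw [hstepB, PySem.Dict.keys_insert_of_not_contains B _ hcf]
        refine hnodup.append (by simp) ?_
        intro y hy hy2
        rw [List.mem_singleton] at hy2
        subst hy2
        have hyc : B.contains y = true := (PySem.Dict.contains_iff_mem_keys B y).mpr hy
        rw [hcf] at hyc
        cases hyc
      · intro q hq
        rw [hstepB] at hq
        rcases (PySem.Dict.mem_items_insert _ _ _ _).mp hq with rfl | h1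
        · simp
        · exact hne q h1.1

-- ===== VERDICT (by name: the statement is the Claim_ definition above) =====
theorem update_product_csv_spec : Claim_equal_update_product_csv := by
  intro file _ hpre
  unfold Spec_update_product_csv
  obtain ⟨hitems, _, _⟩ := pvMain file hpre.1
  rw [pvPortA_eq, pvPortB_eq]
  simp only [PySem.Dict.values, hitems, List.map_map]
  rfl
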